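-- pv_equiv track=rewrite | github.com/DinoYoda/Cookie-Run-Builds | import_wiki_skill_icons.py | expand_skill_icon_slug_candidates
-- ===== SOURCE A (Python) =====
-- def expand_skill_icon_slug_candidates(slugs: list[str]) -> list[str]:
--     """Add filename alternates wiki may use (e.g. display slug `foo_cookie` vs `foo`)."""
--     out: list[str] = []
--     seen: set[str] = set()
--
--     def push(s: str) -> None:
--         if s and s not in seen:
--             seen.add(s)
--             out.append(s)
--
--     for s in slugs:
--         push(s)
--         if s.endswith("_cookie"):
--             push(s[: -len("_cookie")])
--     return out
-- ===== SOURCE B (Python) =====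
-- def expand_skill_icon_slug_candidates(slugs: list[str]) -> list[str]:
--     """Add filename alternates wiki may use (e.g. display slug `foo_cookie` vs `foo`)."""
--     # Stage 1: generate every raw candidate in order.
--     candidates: list[str] = []
--     for s in slugs:
--         candidates.append(s)
--         if s.endswith("_cookie"):
--             candidates.append(s[:-7])
--
--     # Stage 2: worklist head-filter dedup — no seen set: take the head, and if it is
--     # truthy emit it and filter every occurrence of it out of the remaining worklist.
--     out: list[str] = []
--     work = candidates
--     while work:
--         head = work[0]
--         if head:
--             out.append(head)
--             work = [c for c in work if c != head]
--         else:
--             work = work[1:]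
--     return out
-- ===== Notes on version B (the rewrite author's own statement) =====
-- stated objective: alternative
-- what changed: Two separated stages and a different dedup mechanism: a plain generation loop producing all raw candidates, then a worklist head-filter loop that emits each truthy head and filters its occurrences out of the remaining worklist, so no seen-set is maintained at all.
import Mathlib
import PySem

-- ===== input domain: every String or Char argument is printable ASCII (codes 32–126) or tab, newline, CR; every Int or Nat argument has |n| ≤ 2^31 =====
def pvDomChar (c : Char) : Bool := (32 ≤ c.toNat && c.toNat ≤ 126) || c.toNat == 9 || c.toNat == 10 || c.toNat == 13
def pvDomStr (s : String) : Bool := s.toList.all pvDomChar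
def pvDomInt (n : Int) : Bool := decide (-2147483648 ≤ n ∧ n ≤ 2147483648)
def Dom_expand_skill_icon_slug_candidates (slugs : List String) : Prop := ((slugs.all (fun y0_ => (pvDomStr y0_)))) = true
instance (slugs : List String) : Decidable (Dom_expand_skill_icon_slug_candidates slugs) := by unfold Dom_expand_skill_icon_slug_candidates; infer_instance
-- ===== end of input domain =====

-- B separates generation from dedup and replaces A's seen-set entirely by a worklist
-- head-filter dedup (emit a truthy head, filter its copies out of the worklist); objective: alternative, same results.

-- ===== PORT A =====
-- A's nested 'push' closure, acting on the (out, seen) state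
def pvPush (st : List String × PySem.Set String) (s : String) : List String × PySem.Set String :=
  if s ≠ "" ∧ ¬ PySem.Set.contains st.2 s then (st.1 ++ [s], PySem.Set.add st.2 s) else st

def expand_skill_icon_slug_candidates (slugs : List String) : List String :=
  (slugs.foldl
    (fun st s =>
      let st := pvPush st s
      if PySem.Str.endswith s "_cookie" then pvPush st (PySem.Str.slice s none (some (-7))) else st)
    ([], PySem.Set.empty)).1

-- ===== PORT B =====
-- stage 2 of Source B: the worklist head-filter dedup loop (no seen set), as the obvious
-- recursion on the worklist: take the head; if truthy, emit it and filter all of its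
-- occurrences out of the whole worklist (which removes the head itself) before continuing
def pvDedup : List String → List String
  | [] => []
  | c :: rest =>
    if c = "" then pvDedup rest
    else c :: pvDedup ((c :: rest).filter (fun x => x ≠ c))
termination_by cs => cs.length
decreasing_by
  · simp
  · simp
    exact List.length_filter_le _ rest

def expand_skill_icon_slug_candidates_alt (slugs : List String) : List String :=
  -- stage 1 of Source B: generation loop appending every raw candidate in order
  let candidates := slugs.foldl
    (fun acc s =>
      let acc := acc ++ [s]
      if PySem.Str.endswith s "_cookie" then acc ++ [PySem.Str.slice s none (some (-7))] else acc)
    []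
  pvDedup candidates

-- ===== PRECONDITION & SPEC =====
def Spec_expand_skill_icon_slug_candidates (slugs : List String) (out : List String) : Prop := out = expand_skill_icon_slug_candidates_alt slugs
instance (slugs : List String) (out : List String) : Decidable (Spec_expand_skill_icon_slug_candidates slugs out) := by unfold Spec_expand_skill_icon_slug_candidates; infer_instance

-- ===== CLAIM (what is proved, stated in full; the proofs are below) =====
def Claim_equal_expand_skill_icon_slug_candidates : Prop := ∀ (slugs : List String), Dom_expand_skill_icon_slug_candidates slugs → Spec_expand_skill_icon_slug_candidates slugs (expand_skill_icon_slug_candidates slugs)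

-- ===== LEMMAS AND PROOFS =====
-- per-slug candidate list, shared by the analyses of both ports
def pvCands (s : String) : List String :=
  if PySem.Str.endswith s "_cookie" then [s, PySem.Str.slice s none (some (-7))] else [s]

-- A's per-element body is the fold of push over that element's candidate list
theorem pv_step_eq (st : List String × PySem.Set String) (s : String) :
    (let st := pvPush st s
     if PySem.Str.endswith s "_cookie" then pvPush st (PySem.Str.slice s none (some (-7))) else st)
    = (pvCands s).foldl pvPush st := by
  cases h : PySem.Str.endswith s "_cookie" <;> simp only [pvCands, h] <;> simp [List.foldl]

-- A's whole fold is the fold of push over the flattened candidate list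
theorem pv_foldl_flatMap (l : List String) (st : List String × PySem.Set String) :
    l.foldl
      (fun st s =>
        let st := pvPush st s
        if PySem.Str.endswith s "_cookie" then pvPush st (PySem.Str.slice s none (some (-7))) else st)
      st
    = (l.flatMap pvCands).foldl pvPush st := by
  induction l generalizing st with
  | nil => rfl
  | cons x xs ih =>
    simp only [List.flatMap_cons, List.foldl_append, List.foldl_cons]
    rw [pv_step_eq, ih]

-- B's generation loop builds the same flattened candidate list
theorem pv_gen_eq (l : List String) (acc : List String) :
    l.foldl
      (fun acc s =>
        let acc := acc ++ [s]
        if PySem.Str.endswith s "_cookie" then acc ++ [PySem.Str.slice s none (some (-7))] else acc)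
      acc
    = acc ++ l.flatMap pvCands := by
  induction l generalizing acc with
  | nil => simp
  | cons x xs ih =>
    simp only [List.foldl_cons]
    rw [ih]
    cases h : PySem.Chars.endswith x.toList ['_', 'c', 'o', 'o', 'k', 'i', 'e'] <;>
      simp [pvCands, PySem.Str.endswith, h, List.append_assoc]

-- the seen-set dedup, as a function of the remaining input and the seen set
def pvDedupS : List String → PySem.Set String → List String
  | [], _ => []
  | c :: rest, seen =>
    if c ≠ "" ∧ ¬ PySem.Set.contains seen c then c :: pvDedupS rest (PySem.Set.add seen c)
    else pvDedupS rest seen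

-- A's push fold produces exactly the seen-set dedup of its input
theorem pv_foldl_push_eq (l : List String) (out : List String) (seen : PySem.Set String) :
    (l.foldl pvPush (out, seen)).1 = out ++ pvDedupS l seen := by
  induction l generalizing out seen with
  | nil => simp [pvDedupS]
  | cons c rest ih =>
    by_cases he : c = ""
    · simp [pvPush, pvDedupS, he, ih]
    · by_cases hm : c ∈ seen
      · simp [pvPush, pvDedupS, he, hm, ih]
      · simp [pvPush, pvDedupS, he, hm, ih, List.append_assoc]

-- seen-set dedup = head-filter dedup of the input with the seen elements pre-filtered away
theorem pv_dedupS_eq_dedup_filter (l : List String) (seen : PySem.Set String) :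
    pvDedupS l seen = pvDedup (l.filter (fun x => !(PySem.Set.contains seen x))) := by
  induction l generalizing seen with
  | nil => simp [pvDedupS, pvDedup]
  | cons c rest ih =>
    by_cases hm : c ∈ seen
    · simp [pvDedupS, hm, ih]
    · by_cases he : c = ""
      · subst he
        simp [pvDedupS, hm, pvDedup, ih]
      · have hfilter : rest.filter (fun x => !(PySem.Set.contains (PySem.Set.add seen c) x))
            = (rest.filter (fun x => !(PySem.Set.contains seen x))).filter (fun x => x ≠ c) := by
          rw [List.filter_filter]
          apply List.filter_congr
          intro x _
          by_cases hxc : x = c <;> simp [PySem.Set.add_of_not_mem hm, hxc]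
        simp only [pvDedupS, ih, hfilter]
        simp [pvDedup, hm, he]

-- the fold over the empty seen set is the plain head-filter dedup
theorem pv_foldl_push_empty (l : List String) :
    (l.foldl pvPush ([], PySem.Set.empty)).1 = pvDedup l := by
  rw [pv_foldl_push_eq, pv_dedupS_eq_dedup_filter]
  simp [PySem.Set.empty]

-- ===== VERDICT (by name: the statement is the Claim_ definition above) =====
theorem expand_skill_icon_slug_candidates_spec : Claim_equal_expand_skill_icon_slug_candidates := by
  intro slugs _
  unfold Spec_expand_skill_icon_slug_candidates expand_skill_icon_slug_candidates expand_skill_icon_slug_candidates_alt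
  rw [pv_foldl_flatMap, pv_foldl_push_empty, pv_gen_eq]
  simp
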